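-- pv_equiv track=rewrite | github.com/JungyuOO/OCPOps-PlaybookStudio | src/play_book_studio/intake/pptx_ocr_augment.py | _deck_ocr_status
-- ===== SOURCE A (Python) =====
-- from typing import Any
--
-- def _deck_ocr_status(slides: list[dict[str, Any]]) -> str:
--     statuses = [str(slide.get("ocr_status") or "").strip() for slide in slides]
--     if "applied" in statuses:
--         return "applied"
--     if "low_confidence" in statuses:
--         return "low_confidence"
--     if "blocked" in statuses:
--         return "blocked"
--     if "not_configured" in statuses:
--         return "not_configured"
--     if "failed" in statuses:
--         return "failed"
--     return "not_run"
-- ===== SOURCE B (Python) =====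
-- _RANK = {"applied": 0, "low_confidence": 1, "blocked": 2, "not_configured": 3, "failed": 4}
-- _NAMES = ["applied", "low_confidence", "blocked", "not_configured", "failed"]
--
-- def _deck_ocr_status(slides):
--     best = 5
--     for slide in slides:
--         r = _RANK.get(str(slide.get("ocr_status") or "").strip(), 5)
--         if r < best:
--             best = r
--     return _NAMES[best] if best < 5 else "not_run"
-- ===== Notes on version B (the rewrite author's own statement) =====
-- stated objective: alternative
-- what changed: Replaces the intermediate statuses list plus five sequential membership scans with a single pass that keeps the minimum priority rank seen and maps it back to its name at the end.
import Mathlib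
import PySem

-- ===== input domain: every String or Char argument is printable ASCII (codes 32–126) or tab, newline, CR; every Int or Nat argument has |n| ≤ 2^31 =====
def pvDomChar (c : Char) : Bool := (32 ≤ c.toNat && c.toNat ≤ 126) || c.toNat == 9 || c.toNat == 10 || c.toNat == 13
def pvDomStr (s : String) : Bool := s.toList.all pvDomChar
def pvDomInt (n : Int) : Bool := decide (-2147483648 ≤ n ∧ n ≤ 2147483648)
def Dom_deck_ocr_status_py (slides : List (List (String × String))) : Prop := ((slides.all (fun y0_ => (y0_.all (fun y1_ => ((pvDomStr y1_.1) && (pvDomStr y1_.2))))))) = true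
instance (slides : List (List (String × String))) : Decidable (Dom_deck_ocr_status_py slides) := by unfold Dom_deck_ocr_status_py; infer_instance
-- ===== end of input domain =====

-- B replaces A's intermediate statuses list and its five sequential membership scans by a single pass
-- keeping the minimum priority rank, mapped back to its name at the end.

-- ===== PORT A =====
-- shared normalization, str(slide.get("ocr_status") or "").strip(): missing key or empty value → "", else the value; then strip
def pvNormStatus (slide : List (String × String)) : String :=
  PySem.Str.strip
    (match (PySem.Dict.mk slide).get? "ocr_status" with
     | none => ""
     | some v => if v = "" then "" else v)

def deck_ocr_status_py (slides : List (List (String × String))) : String :=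
  let statuses := slides.map pvNormStatus
  if statuses.contains "applied" then "applied"
  else if statuses.contains "low_confidence" then "low_confidence"
  else if statuses.contains "blocked" then "blocked"
  else if statuses.contains "not_configured" then "not_configured"
  else if statuses.contains "failed" then "failed"
  else "not_run"

-- ===== PORT B =====
-- _RANK and _NAMES of Source B
def pvRanks : PySem.Dict String Nat :=
  PySem.Dict.mk [("applied", 0), ("low_confidence", 1), ("blocked", 2), ("not_configured", 3), ("failed", 4)]

def pvNames : List String := ["applied", "low_confidence", "blocked", "not_configured", "failed"]

def deck_ocr_status_py_alt (slides : List (List (String × String))) : String :=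
  let best := slides.foldl (fun b slide =>
    let r := pvRanks.getD (pvNormStatus slide) 5
    if r < b then r else b) 5
  if best < 5 then pvNames.getD best "" else "not_run"

-- ===== PRECONDITION & SPEC =====
def Spec_deck_ocr_status_py (slides : List (List (String × String))) (out : String) : Prop := out = deck_ocr_status_py_alt slides
instance (slides : List (List (String × String))) (out : String) : Decidable (Spec_deck_ocr_status_py slides out) := by unfold Spec_deck_ocr_status_py; infer_instance

-- ===== CLAIM (what is proved, stated in full; the proofs are below) =====
def Claim_equal_deck_ocr_status_py : Prop := ∀ (slides : List (List (String × String))), Dom_deck_ocr_status_py slides → Spec_deck_ocr_status_py slides (deck_ocr_status_py slides)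

-- ===== LEMMAS AND PROOFS =====

def pvRank (s : String) : Nat := pvRanks.getD s 5
def pvMin (st : List String) : Nat := st.foldl (fun b s => if pvRank s < b then pvRank s else b) 5
lemma pvRank_le (s : String) : pvRank s ≤ 5 := by
  simp only [pvRank, pvRanks, PySem.Dict.getD_eq_get?_getD, PySem.Dict.get?_mk_cons]
  split_ifs
  all_goals simp [PySem.Dict.get?]
lemma pvMin_le (st : List String) : pvMin st ≤ 5 := by
  have : ∀ b : Nat, b ≤ 5 → st.foldl (fun b s => if pvRank s < b then pvRank s else b) b ≤ 5 := by
    induction st with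
    | nil => intro b hb; simpa using hb
    | cons s st ih =>
      intro b hb
      have hr := pvRank_le s
      simp only [List.foldl_cons]
      exact ih _ (by split_ifs <;> omega)
  exact this 5 le_rfl
lemma pvMin_comm (st : List String) : ∀ b : Nat, b ≤ 5 →
    st.foldl (fun b s => if pvRank s < b then pvRank s else b) b = min b (pvMin st) := by
  induction st with
  | nil => intro b hb; simp [pvMin]; omega
  | cons s st ih =>
    intro b hb
    have hr := pvRank_le s
    simp only [pvMin, List.foldl_cons]
    rw [ih (if pvRank s < b then pvRank s else b) (by split_ifs <;> omega),
        ih (if pvRank s < 5 then pvRank s else 5) (by split_ifs <;> omega)]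
    have hM := pvMin_le st
    simp only [pvMin] at hM
    split_ifs <;> omega
lemma pvMin_cons (s : String) (st : List String) : pvMin (s :: st) = min (pvRank s) (pvMin st) := by
  have hr := pvRank_le s
  simp only [pvMin, List.foldl_cons]
  rw [pvMin_comm st (if pvRank s < 5 then pvRank s else 5) (by split_ifs <;> omega)]
  have hM := pvMin_le st
  simp only [pvMin] at hM ⊢
  split_ifs <;> omega
lemma pvRank_lt_name (s : String) (h : pvRank s < 5) : s = pvNames.getD (pvRank s) "" := by
  revert h
  simp only [pvRank, pvRanks, PySem.Dict.getD_eq_get?_getD, PySem.Dict.get?_mk_cons]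
  split_ifs with h1 h2 h3 h4 h5
  all_goals intro h
  all_goals simp_all [beq_iff_eq, pvNames]
  all_goals simp [PySem.Dict.get?] at h

lemma pvRank_name (k : Nat) (hk : k < 5) : pvRank (pvNames.getD k "") = k := by
  interval_cases k <;> decide

lemma pvMin_le_of_contains (st : List String) (k : Nat)
    (h : st.contains (pvNames.getD k "") = true) (hk : pvRank (pvNames.getD k "") = k) : pvMin st ≤ k := by
  induction st with
  | nil => simp at h
  | cons s st ih =>
    rw [pvMin_cons]
    simp only [List.contains_cons, Bool.or_eq_true, beq_iff_eq] at h
    rcases h with h | h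
    · subst h; omega
    · have := ih h; omega
lemma contains_of_pvMin_lt (st : List String) (h : pvMin st < 5) :
    st.contains (pvNames.getD (pvMin st) "") = true := by
  induction st with
  | nil => simp [pvMin] at h
  | cons s st ih =>
    rw [pvMin_cons] at *
    simp only [List.contains_cons, Bool.or_eq_true, beq_iff_eq]
    by_cases hc : pvRank s ≤ pvMin st
    · left
      have h5 : pvRank s < 5 := by omega
      have hm : min (pvRank s) (pvMin st) = pvRank s := by omega
      rw [hm]
      exact (pvRank_lt_name s h5).symm
    · right
      have hm : min (pvRank s) (pvMin st) = pvMin st := by omega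
      rw [hm]
      exact ih (by omega)

lemma pvChain_eq (st : List String) :
    (if st.contains "applied" then "applied"
     else if st.contains "low_confidence" then "low_confidence"
     else if st.contains "blocked" then "blocked"
     else if st.contains "not_configured" then "not_configured"
     else if st.contains "failed" then "failed"
     else "not_run")
    = (if pvMin st < 5 then pvNames.getD (pvMin st) "" else "not_run") := by
  have hM := pvMin_le st
  have hfalse : ∀ j : Nat, j < 5 → j < pvMin st → st.contains (pvNames.getD j "") = false := by
    intro j hj hgt
    by_contra hb
    simp only [Bool.not_eq_false] at hb
    have := pvMin_le_of_contains st j hb (pvRank_name j hj)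
    omega
  have hcases : pvMin st = 0 ∨ pvMin st = 1 ∨ pvMin st = 2 ∨ pvMin st = 3 ∨ pvMin st = 4 ∨ pvMin st = 5 := by omega
  rcases hcases with h | h | h | h | h | h
  · have hc : st.contains "applied" = true := by
      have hc := contains_of_pvMin_lt st (by omega)
      rw [h] at hc; exact hc
    replace hc := (List.contains_iff_mem).mp hc
    simp [hc, h, pvNames]
  · have hc : st.contains "low_confidence" = true := by
      have hc := contains_of_pvMin_lt st (by omega)
      rw [h] at hc; exact hc
    replace hc := (List.contains_iff_mem).mp hc
    have e0 : "applied" ∉ st := by simpa using hfalse 0 (by omega) (by omega)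
    simp [hc, e0, h, pvNames]
  · have hc : st.contains "blocked" = true := by
      have hc := contains_of_pvMin_lt st (by omega)
      rw [h] at hc; exact hc
    replace hc := (List.contains_iff_mem).mp hc
    have e0 : "applied" ∉ st := by simpa using hfalse 0 (by omega) (by omega)
    have e1 : "low_confidence" ∉ st := by simpa using hfalse 1 (by omega) (by omega)
    simp [hc, e0, e1, h, pvNames]
  · have hc : st.contains "not_configured" = true := by
      have hc := contains_of_pvMin_lt st (by omega)
      rw [h] at hc; exact hc
    replace hc := (List.contains_iff_mem).mp hc
    have e0 : "applied" ∉ st := by simpa using hfalse 0 (by omega) (by omega)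
    have e1 : "low_confidence" ∉ st := by simpa using hfalse 1 (by omega) (by omega)
    have e2 : "blocked" ∉ st := by simpa using hfalse 2 (by omega) (by omega)
    simp [hc, e0, e1, e2, h, pvNames]
  · have hc : st.contains "failed" = true := by
      have hc := contains_of_pvMin_lt st (by omega)
      rw [h] at hc; exact hc
    replace hc := (List.contains_iff_mem).mp hc
    have e0 : "applied" ∉ st := by simpa using hfalse 0 (by omega) (by omega)
    have e1 : "low_confidence" ∉ st := by simpa using hfalse 1 (by omega) (by omega)
    have e2 : "blocked" ∉ st := by simpa using hfalse 2 (by omega) (by omega)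
    have e3 : "not_configured" ∉ st := by simpa using hfalse 3 (by omega) (by omega)
    simp [hc, e0, e1, e2, e3, h, pvNames]
  · have e0 : "applied" ∉ st := by simpa using hfalse 0 (by omega) (by omega)
    have e1 : "low_confidence" ∉ st := by simpa using hfalse 1 (by omega) (by omega)
    have e2 : "blocked" ∉ st := by simpa using hfalse 2 (by omega) (by omega)
    have e3 : "not_configured" ∉ st := by simpa using hfalse 3 (by omega) (by omega)
    have e4 : "failed" ∉ st := by simpa using hfalse 4 (by omega) (by omega)
    simp [e0, e1, e2, e3, e4, h]

-- B's fold over slides equals the minimum rank of the normalized statuses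
lemma pvFold_eq (slides : List (List (String × String))) :
    slides.foldl (fun b slide =>
      let r := pvRanks.getD (pvNormStatus slide) 5
      if r < b then r else b) 5 = pvMin (slides.map pvNormStatus) := by
  simp only [pvMin, List.foldl_map, pvRank]

-- ===== VERDICT (by name: the statement is the Claim_ definition above) =====
theorem deck_ocr_status_py_spec : Claim_equal_deck_ocr_status_py := by
  intro slides _
  unfold Spec_deck_ocr_status_py deck_ocr_status_py deck_ocr_status_py_alt
  rw [pvFold_eq]
  exact pvChain_eq (slides.map pvNormStatus)
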